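-- pv_equiv track=rewrite | github.com/MrHamdulay/csc3-capstone | examples/data/Assignment_8/srdpra001/question3.py | Encryptf
-- ===== SOURCE A (Python) =====
-- def Encryptf(i): #function Encryptf defined as the function to encrypt the sentence with the variable name i
--
--     if i[0]==" ": #terminator step of the recursive step
--         return " "+Encryptf(i[1:])
--     elif (i[0]==i[len(i)-1]): #The recursive step
--         if i[0].islower():  #checks if input to lower case
--             if i[0]=="z": #returns a if z is reached.
--                 return "a"
--             else:
--                 return chr(ord(i[0])+1)
--         else:
--             return i[0]
-- #the recursive steps
--     elif i[0].isupper():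
--         return i[0]+Encryptf(i[1:])
--     elif i[0].islower():
--         if i[0]=="z":
--             return "a"+Encryptf(i[1:])
--         else:
--             return chr(ord(i[0])+1)+Encryptf(i[1:])
--     else:
--         return Encryptf(i[1:])
-- ===== SOURCE B (Python) =====
-- def Encryptf(i):
--     last = i[-1]
--     k = i.index(last)
--
--     def t(c):
--         if c == ' ':
--             return ' '
--         if c.islower():
--             return 'a' if c == 'z' else chr(ord(c) + 1)
--         if c.isupper():
--             return c
--         return ''
--
--     stop = ('a' if last == 'z' else chr(ord(last) + 1)) if last.islower() else last
--     return ''.join(t(c) for c in i[:k]) + stop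
-- ===== Notes on version B (the rewrite author's own statement) =====
-- stated objective: faster
-- what changed: Replaced the O(n^2) recursion that re-slices the string and re-reads the suffix's last character at every step by: compute the last character and its first index once with str.index, transform the prefix in a single pass, and append the transformed stop character.
-- crash fix: On nonempty strings ending in a space (and on the empty string) A raises IndexError (the space branch recurses past the end); B returns the transformed string there. — e.g. on Encryptf("ab "): A raises IndexError, B returns "bc "
import Mathlib
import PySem

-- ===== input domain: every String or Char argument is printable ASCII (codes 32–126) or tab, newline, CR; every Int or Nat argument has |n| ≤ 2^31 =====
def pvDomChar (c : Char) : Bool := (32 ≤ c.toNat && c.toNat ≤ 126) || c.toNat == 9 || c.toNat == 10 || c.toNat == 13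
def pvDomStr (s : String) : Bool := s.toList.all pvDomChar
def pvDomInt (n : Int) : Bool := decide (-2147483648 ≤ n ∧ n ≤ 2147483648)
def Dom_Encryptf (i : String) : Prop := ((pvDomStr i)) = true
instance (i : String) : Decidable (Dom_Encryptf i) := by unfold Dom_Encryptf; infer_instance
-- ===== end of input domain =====

-- B replaces A's recursion (which re-reads the suffix's last char at every step) by:
-- find the stop index once with index, transform the prefix in one pass, append the stop char.

-- Python str.islower()/isupper() restricted to the ASCII domain (exact on Dom_Encryptf)
def pyLower (c : Char) : Bool := 'a' ≤ c && c ≤ 'z'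
def pyUpper (c : Char) : Bool := 'A' ≤ c && c ≤ 'Z'
-- 'a' if c=='z' else chr(ord(c)+1)
def rotC (c : Char) : Char := if c = 'z' then 'a' else Char.ofNat (c.toNat + 1)

-- ===== PORT A =====
-- literal transliteration of A's recursion over the character list; [] is Python's IndexError (excluded by Pre_)
def encA : List Char → List Char
  | [] => []
  | c :: rest =>
    if c = ' ' then ' ' :: encA rest
    else if c = rest.getLastD c then                      -- i[0] == i[len(i)-1]
      if pyLower c then
        if c = 'z' then ['a'] else [Char.ofNat (c.toNat + 1)]
      else [c]
    else if pyUpper c then c :: encA rest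
    else if pyLower c then
      if c = 'z' then 'a' :: encA rest else Char.ofNat (c.toNat + 1) :: encA rest
    else encA rest

def Encryptf (i : String) : String := String.ofList (encA i.toList)

-- ===== PORT B =====
-- t(c) from Source B: per-character transform of the prefix before the stop index
def tB (c : Char) : List Char :=
  if c = ' ' then [' ']
  else if pyLower c then [rotC c]
  else if pyUpper c then [c]
  else []

def Encryptf_alt (i : String) : String :=
  let l := i.toList
  let last := l.getLastD ' '                               -- i[-1]
  let k := l.idxOf last                                    -- i.index(last)
  let stop := if pyLower last then rotC last else last
  String.ofList ((l.take k).flatMap tB ++ [stop])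

-- ===== PRECONDITION & SPEC =====
-- Pre_ excludes exactly the inputs where A raises: the empty string and strings whose
-- last character is a space (the space branch recurses past the end, IndexError).
def Pre_Encryptf (i : String) : Prop := i.toList ≠ [] ∧ i.toList.getLast? ≠ some ' '
instance (i : String) : Decidable (Pre_Encryptf i) := by unfold Pre_Encryptf; infer_instance
def pvWitness_Encryptf : String := "hello"

-- A raises IndexError on every nonempty string ending in a space; B returns the transformed string.
def Raises_Encryptf (i : String) : Prop := i.toList ≠ [] ∧ i.toList.getLast? = some ' '
instance (i : String) : Decidable (Raises_Encryptf i) := by unfold Raises_Encryptf; infer_instance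
def pvRaiseWitness_Encryptf : String := "ab "
def pvRaiseWitnessOut_Encryptf : String := "bc "

def Spec_Encryptf (i : String) (out : String) : Prop := out = Encryptf_alt i
instance (i : String) (out : String) : Decidable (Spec_Encryptf i out) := by unfold Spec_Encryptf; infer_instance

-- ===== CLAIM (what is proved, stated in full; the proofs are below) =====
def Claim_equal_Encryptf : Prop := ∀ (i : String), Dom_Encryptf i → Pre_Encryptf i → Spec_Encryptf i (Encryptf i)
def Claim_raises_Encryptf : Prop := (∀ (i : String), Dom_Encryptf i → Raises_Encryptf i → ¬ Pre_Encryptf i) ∧ (Dom_Encryptf (pvRaiseWitness_Encryptf) ∧ Raises_Encryptf (pvRaiseWitness_Encryptf) ∧ Encryptf_alt (pvRaiseWitness_Encryptf) = pvRaiseWitnessOut_Encryptf)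

-- ===== LEMMAS AND PROOFS =====

lemma not_lower_and_upper (c : Char) : pyLower c = true → pyUpper c = true → False := by
  simp only [pyLower, pyUpper, Bool.and_eq_true, decide_eq_true_eq]
  rintro ⟨h1, _⟩ ⟨_, h4⟩
  exact absurd (le_trans h1 h4) (by decide)

lemma key_lemma (L : Char) (hL : L ≠ ' ') : ∀ l : List Char, l ≠ [] → l.getLast? = some L →
    encA l = (l.take (l.idxOf L)).flatMap tB ++ [if pyLower L then rotC L else L] := by
  intro l
  induction l with
  | nil => intro h; exact absurd rfl h
  | cons c rest ih =>
    intro _ hlast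
    by_cases hcL : c = L
    · subst hcL
      have hgd : rest.getLastD c = c := by
        cases rest with
        | nil => rfl
        | cons d rs =>
          have := List.getLast?_cons_cons (a := c) (b := d) (l := rs) ▸ hlast
          simp [List.getLastD_eq_getLast?, this]
      simp only [encA, if_neg hL, hgd, List.idxOf_cons_self, List.take_zero,
        List.flatMap_nil, List.nil_append, rotC]
      by_cases hlow : pyLower c
      · rw [if_pos hlow, if_pos hlow]
        split_ifs <;> rfl
      · simp [hlow]
    · have hrest : rest ≠ [] := by
        rintro rfl
        simp at hlast
        exact hcL hlast
      have hlast' : rest.getLast? = some L := by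
        cases rest with
        | nil => exact absurd rfl hrest
        | cons d rs => rw [← List.getLast?_cons_cons (a := c) (b := d) (l := rs)]; exact hlast
      have hgd : rest.getLastD c = L := by
        rw [List.getLastD_eq_getLast?, hlast']; rfl
      have hidx : (c :: rest).idxOf L = rest.idxOf L + 1 := by
        simp [hcL]
      have ihr := ih hrest hlast'
      have hstop : ¬ (c = rest.getLastD c) := by rw [hgd]; exact hcL
      have hflat : List.flatMap tB (List.take ((c :: rest).idxOf L) (c :: rest)) ++
          [if pyLower L then rotC L else L] =
          tB c ++ (List.flatMap tB (List.take (rest.idxOf L) rest) ++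
            [if pyLower L then rotC L else L]) := by
        rw [hidx]; simp
      rw [hflat, ← ihr]
      show encA (c :: rest) = tB c ++ encA rest
      by_cases hsp : c = ' '
      · simp [encA, tB, hsp]
      · simp only [encA, tB, if_neg hsp, if_neg hstop]
        by_cases hlow : pyLower c
        · have hup : ¬ pyUpper c = true := fun h => not_lower_and_upper c hlow h
          rw [if_neg hup, if_pos hlow, if_pos hlow]
          rcases eq_or_ne c 'z' with hz | hz
          · simp [hz, rotC]
          · simp [hz, rotC]
        · by_cases hup : pyUpper c
          · rw [if_pos hup, if_neg hlow, if_pos hup]; simp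
          · rw [if_neg hup, if_neg hlow, if_neg hlow, if_neg hup]; simp

-- ===== VERDICT (by name: the statement is the Claim_ definition above) =====
theorem Encryptf_spec : Claim_equal_Encryptf := by
  intro i _ hpre
  obtain ⟨hne, hsp⟩ := hpre
  unfold Spec_Encryptf Encryptf Encryptf_alt
  obtain ⟨L, hL⟩ : ∃ L, i.toList.getLast? = some L := by
    cases h : i.toList.getLast? with
    | none => exact absurd (List.getLast?_eq_none_iff.mp h) hne
    | some L => exact ⟨L, rfl⟩
  have hLsp : L ≠ ' ' := by rintro rfl; exact hsp hL
  have hgd : i.toList.getLastD ' ' = L := by rw [List.getLastD_eq_getLast?, hL]; rfl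
  simp only [hgd]
  rw [key_lemma L hLsp i.toList hne hL]

@[simp] theorem Encryptf_raises : Claim_raises_Encryptf := by
  unfold Claim_raises_Encryptf
  refine ⟨?_, by decide⟩
  intro i _ ⟨_, h⟩ ⟨_, h2⟩
  exact h2 h
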